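-- pv_equiv track=rewrite | github.com/ilveron/FondProg1 | DomJudge/Scripts/n74.py | CalcolaAsterischi
-- ===== SOURCE A (Python) =====
-- def CalcolaAsterischi(N):
--     Totali = 0
--     for k in range(1, N+1):
--         if k == N:
--             TriangoloSup = Totali
--
--         Totali += k+(k-1)
--
--     Totali += TriangoloSup
--
--     return Totali
-- ===== SOURCE B (Python) =====
-- def CalcolaAsterischi(N):
--     # closed form: loop sums 1+3+...+(2N-1) = N^2, plus the partial sum (N-1)^2
--     return N * N + (N - 1) * (N - 1)
-- ===== Notes on version B (the rewrite author's own statement) =====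
-- stated objective: faster
-- what changed: Replaces the O(N) accumulation loop (sum of 2k-1 with a snapshot before the last step) by the closed form N^2 + (N-1)^2.
-- outside the precondition, e.g. on CalcolaAsterischi(0): A raises UnboundLocalError, B returns 1
import Mathlib
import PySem

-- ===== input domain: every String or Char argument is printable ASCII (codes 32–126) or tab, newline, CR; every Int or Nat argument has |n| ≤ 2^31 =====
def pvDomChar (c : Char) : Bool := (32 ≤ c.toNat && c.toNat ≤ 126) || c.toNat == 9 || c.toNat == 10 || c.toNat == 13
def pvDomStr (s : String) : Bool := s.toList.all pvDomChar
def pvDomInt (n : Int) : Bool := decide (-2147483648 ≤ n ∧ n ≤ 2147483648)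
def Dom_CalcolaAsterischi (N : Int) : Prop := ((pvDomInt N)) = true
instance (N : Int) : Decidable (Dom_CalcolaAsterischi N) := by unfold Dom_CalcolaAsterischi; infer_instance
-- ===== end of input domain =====

-- B replaces A's O(N) accumulation loop by the closed form N^2 + (N-1)^2.

-- ===== PORT A =====
-- the loop state is (Totali, TriangoloSup); TriangoloSup is Option Int, none = still unbound
-- (Python raises UnboundLocalError at the final addition when it is none, i.e. when N ≤ 0;
--  those inputs are excluded by Pre_, so the .getD 0 default is never claimed about)
def CalcolaAsterischi (N : Int) : Int :=
  let st := (PySem.List.pyRange 1 (N + 1) 1).foldl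
    (fun (st : Int × Option Int) k =>
      let st := if k = N then (st.1, some st.1) else st
      (st.1 + (k + (k - 1)), st.2)) (0, none)
  st.1 + st.2.getD 0

-- ===== PORT B =====
def CalcolaAsterischi_alt (N : Int) : Int := N * N + (N - 1) * (N - 1)

-- ===== PRECONDITION & SPEC =====
-- Pre_ excludes N ≤ 0, where the Python A raises UnboundLocalError (TriangoloSup never assigned)
def Pre_CalcolaAsterischi (N : Int) : Prop := 1 ≤ N
instance (N : Int) : Decidable (Pre_CalcolaAsterischi N) := by unfold Pre_CalcolaAsterischi; infer_instance
def pvWitness_CalcolaAsterischi : Int := 3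

def Spec_CalcolaAsterischi (N : Int) (out : Int) : Prop := out = CalcolaAsterischi_alt N
instance (N : Int) (out : Int) : Decidable (Spec_CalcolaAsterischi N out) := by unfold Spec_CalcolaAsterischi; infer_instance

-- ===== CLAIM =====
def Claim_equal_CalcolaAsterischi : Prop := ∀ (N : Int), Dom_CalcolaAsterischi N → Pre_CalcolaAsterischi N → Spec_CalcolaAsterischi N (CalcolaAsterischi N)

-- ===== LEMMAS AND PROOFS =====

-- the A-loop's step function
def pvStep (N : Int) (st : Int × Option Int) (k : Int) : Int × Option Int :=
  let st := if k = N then (st.1, some st.1) else st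
  (st.1 + (k + (k - 1)), st.2)

-- on a prefix containing no k = N, the snapshot component is untouched and Totali just sums
theorem pvFold_no_hit (N : Int) (l : List Int) (t : Int) (s : Option Int)
    (h : ∀ k ∈ l, k ≠ N) :
    l.foldl (pvStep N) (t, s) = (l.foldl (fun t k => t + (k + (k - 1))) t, s) := by
  induction l generalizing t with
  | nil => simp
  | cons a l ih =>
    have ha : a ≠ N := h a (by simp)
    simp only [List.foldl_cons, pvStep, if_neg ha]
    exact ih _ (fun k hk => h k (by simp [hk]))

-- the partial sum of (2k-1) over range(1, n+1) is t + n^2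
theorem pvSum_sq (n : ℕ) (t : Int) :
    (PySem.List.pyRange 1 ((n : Int) + 1) 1).foldl (fun t k => t + (k + (k - 1))) t
      = t + (n : Int) * n := by
  induction n generalizing t with
  | zero => simp [PySem.List.pyRange_one_eq_nil]
  | succ m ih =>
    have h : (1 : Int) ≤ (m : Int) + 1 := by omega
    have := PySem.List.pyRange_one_succ_right (a := 1) (b := (m : Int) + 1) h
    have hcast : ((m + 1 : ℕ) : Int) + 1 = ((m : Int) + 1) + 1 := by push_cast; ring
    rw [hcast, this, List.foldl_append, ih]
    simp only [List.foldl_cons, List.foldl_nil]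
    push_cast; ring

theorem CalcolaAsterischi_closed (N : Int) (h : 1 ≤ N) :
    CalcolaAsterischi N = N * N + (N - 1) * (N - 1) := by
  unfold CalcolaAsterischi
  have hsplit := PySem.List.pyRange_one_append (a := 1) (m := N) (b := N + 1) h (by omega)
  have hlast : PySem.List.pyRange N (N + 1) 1 = [N] := PySem.List.pyRange_one_singleton N
  have hpre : (PySem.List.pyRange 1 N 1).foldl (pvStep N) ((0 : Int), (none : Option Int))
      = ((N - 1) * (N - 1), none) := by
    have hN : (((N - 1).toNat : Int)) + 1 = N := by omega
    rw [pvFold_no_hit N _ 0 none (fun k hk => by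
      have := (PySem.List.mem_pyRange_one (a := 1) (b := N) (x := k)).mp hk
      omega)]
    have hn : ((N - 1).toNat : Int) = N - 1 := Int.toNat_of_nonneg (by omega)
    rw [← hN, pvSum_sq, hn]
    rw [Prod.mk.injEq]
    exact ⟨by ring, rfl⟩
  have hfold : (PySem.List.pyRange 1 (N + 1) 1).foldl (pvStep N) ((0 : Int), (none : Option Int))
      = (N * N, some ((N - 1) * (N - 1))) := by
    rw [hsplit, hlast, List.foldl_append, hpre]
    simp only [List.foldl_cons, List.foldl_nil, pvStep, if_pos, Prod.mk.injEq]
    exact ⟨by ring, trivial⟩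
  show ((PySem.List.pyRange 1 (N + 1) 1).foldl (pvStep N) (0, none)).1
      + ((PySem.List.pyRange 1 (N + 1) 1).foldl (pvStep N) (0, none)).2.getD 0
      = N * N + (N - 1) * (N - 1)
  rw [hfold]
  simp

-- ===== VERDICT =====
theorem CalcolaAsterischi_spec : Claim_equal_CalcolaAsterischi := by
  intro N _ h
  unfold Spec_CalcolaAsterischi CalcolaAsterischi_alt
  exact CalcolaAsterischi_closed N h
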